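-- pv_equiv track=rewrite | github.com/farodoc/Algorithms-and-Data-Structures-AGH-UST | Random tasks/Zestaw 3/12.py | najdlArytDodatni
-- ===== SOURCE A (Python) =====
-- def najdlArytDodatni(t):
--     maxDl = 1
--     i = 0
--
--     while i < len(t) - 1:
--         r = t[i + 1] - t[i]
--         if r <= 0:
--             i += 1
--
--         else:
--             koniec = i + 1
--             tempDl = 2
--
--             while koniec < len(t) - 1 and t[koniec] + r == t[koniec + 1]:
--                 tempDl += 1
--                 koniec += 1
--
--             if tempDl > maxDl:
--                 maxDl = tempDl
--
--             i = koniec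
--
--     return maxDl
-- ===== SOURCE B (Python) =====
-- def najdlArytDodatni(t):
--     maxDl = 1
--     cur = 1
--     for i in range(1, len(t)):
--         d = t[i] - t[i - 1]
--         if d > 0 and i >= 2 and d == t[i - 1] - t[i - 2]:
--             cur += 1
--         elif d > 0:
--             cur = 2
--         else:
--             cur = 1
--         if cur > maxDl:
--             maxDl = cur
--     return maxDl
-- ===== Notes on version B (the rewrite author's own statement) =====
-- stated objective: idiomatic
-- what changed: Replaced A's outer while-loop with a nested run-extension inner loop and index jump by a single flat pass that keeps a running run-length counter and compares only adjacent differences.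
import Mathlib
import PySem

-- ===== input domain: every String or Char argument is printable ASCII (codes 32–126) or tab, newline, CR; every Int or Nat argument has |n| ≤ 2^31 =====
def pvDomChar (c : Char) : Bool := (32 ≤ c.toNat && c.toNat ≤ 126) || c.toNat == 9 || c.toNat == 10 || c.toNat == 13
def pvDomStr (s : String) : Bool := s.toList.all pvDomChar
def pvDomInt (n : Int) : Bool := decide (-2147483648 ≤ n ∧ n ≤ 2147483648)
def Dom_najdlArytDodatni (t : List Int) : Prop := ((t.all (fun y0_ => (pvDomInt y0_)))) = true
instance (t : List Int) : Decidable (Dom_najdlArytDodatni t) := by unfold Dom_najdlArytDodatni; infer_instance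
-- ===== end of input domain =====

-- B replaces A's nested run-extension loop with a flat single pass keeping a running counter (idiomatic).

-- ===== PORT A =====
-- inner while loop of A: extends the run while the next difference equals r; returns (koniec, tempDl).
-- 'fuel' only makes the recursion structural; it never cuts the loop short (the proofs use it only when already exhausted).
def aInner (t : List Int) (r : Int) (fuel koniec : Nat) (tempDl : Int) : Nat × Int :=
  match fuel with
  | 0 => (koniec, tempDl)
  | fuel + 1 =>
    if koniec < t.length - 1 ∧ t.getD koniec 0 + r = t.getD (koniec + 1) 0 then
      aInner t r fuel (koniec + 1) (tempDl + 1)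
    else (koniec, tempDl)

-- outer while loop of A (fuel likewise only a structural-recursion guard; i strictly increases)
def aLoop (t : List Int) (fuel : Nat) (i : Nat) (maxDl : Int) : Int :=
  match fuel with
  | 0 => maxDl
  | fuel + 1 =>
    if i < t.length - 1 then
      let r := t.getD (i + 1) 0 - t.getD i 0
      if r ≤ 0 then aLoop t fuel (i + 1) maxDl
      else
        let p := aInner t r (fuel + 1) (i + 1) 2
        aLoop t fuel p.1 (if p.2 > maxDl then p.2 else maxDl)
    else maxDl

def najdlArytDodatni (t : List Int) : Int := aLoop t t.length 0 1

-- ===== PORT B =====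
-- one step of B's for-loop body: state (maxDl, cur), loop index i
def bStep (t : List Int) (st : Int × Int) (i : Nat) : Int × Int :=
  let d := t.getD i 0 - t.getD (i - 1) 0
  let cur :=
    if d > 0 ∧ 2 ≤ i ∧ d = t.getD (i - 1) 0 - t.getD (i - 2) 0 then st.2 + 1
    else if d > 0 then 2 else 1
  (if cur > st.1 then cur else st.1, cur)

-- for i in range(1, len(t)): … ; return maxDl
def najdlArytDodatni_alt (t : List Int) : Int :=
  ((List.range' 1 (t.length - 1)).foldl (bStep t) (1, 1)).1

-- ===== PRECONDITION & SPEC =====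
def Spec_najdlArytDodatni (t : List Int) (out : Int) : Prop := out = najdlArytDodatni_alt t
instance (t : List Int) (out : Int) : Decidable (Spec_najdlArytDodatni t out) := by unfold Spec_najdlArytDodatni; infer_instance

-- ===== CLAIM (what is proved, stated in full; the proofs are below) =====
def Claim_equal_najdlArytDodatni : Prop := ∀ (t : List Int), Dom_najdlArytDodatni t → Spec_najdlArytDodatni t (najdlArytDodatni t)

-- ===== LEMMAS AND PROOFS =====

-- main invariant: A's outer loop at index i equals B's remaining fold from index i+1,
-- provided B's "extend the run" branch cannot fire at index i+1 (so cur is irrelevant)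
def MainP (n : Nat) : Prop :=
  ∀ (t : List Int) (fuel i : Nat) (maxDl cur : Int),
    t.length - i ≤ n → t.length - 1 - i ≤ fuel → 1 ≤ maxDl →
    (i = 0 ∨ (1 ≤ i ∧
      ¬(t.getD (i + 1) 0 - t.getD i 0 > 0 ∧
        t.getD (i + 1) 0 - t.getD i 0 = t.getD i 0 - t.getD (i - 1) 0))) →
    aLoop t fuel i maxDl =
      ((List.range' (i + 1) (t.length - (i + 1))).foldl (bStep t) (maxDl, cur)).1

-- sub invariant: A's inner run-extension loop matches B's consecutive increments
def SubP (n : Nat) : Prop :=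
  ∀ (t : List Int) (r : Int) (fuelI fuelO koniec : Nat) (tempDl maxDl : Int),
    t.length - koniec ≤ n → t.length - 1 - koniec ≤ fuelI → t.length - 1 - koniec ≤ fuelO →
    1 ≤ koniec → 0 < r →
    t.getD koniec 0 - t.getD (koniec - 1) 0 = r → 1 ≤ maxDl → 2 ≤ tempDl →
    ((List.range' (koniec + 1) (t.length - (koniec + 1))).foldl
        (bStep t) (max maxDl tempDl, tempDl)).1 =
      aLoop t fuelO (aInner t r fuelI koniec tempDl).1
        (max maxDl (aInner t r fuelI koniec tempDl).2)

theorem combined : ∀ n : Nat, MainP n ∧ SubP n := by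
  intro n
  induction n using Nat.strong_induction_on with
  | _ n ih =>
    have hmain : MainP n := by
      intro t fuel i maxDl cur hn hfuel hmax hside
      by_cases hlt : i < t.length - 1
      · obtain ⟨f, rfl⟩ : ∃ f, fuel = f + 1 := ⟨fuel - 1, by omega⟩
        rw [aLoop, if_pos hlt]
        have hrange : t.length - (i + 1) = (t.length - (i + 2)) + 1 := by omega
        rw [hrange, List.range'_succ, List.foldl_cons]
        show _ = (List.foldl (bStep t) (bStep t (maxDl, cur) (i + 1)) _).1
        rw [bStep]
        simp only [Nat.add_sub_cancel]
        set d := t.getD (i + 1) 0 - t.getD i 0 with hd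
        have hnofire : ¬(d > 0 ∧ 2 ≤ i + 1 ∧ d = t.getD i 0 - t.getD (i + 1 - 2) 0) := by
          rcases hside with h0 | ⟨h1, h2⟩
          · subst h0; rintro ⟨-, h, -⟩; omega
          · rintro ⟨hdp, -, heq⟩
            exact h2 ⟨hdp, by have : i + 1 - 2 = i - 1 := by omega
                              rw [this] at heq; exact heq⟩
        rw [if_neg hnofire]
        by_cases hdp : d > 0
        · rw [if_neg (by omega), if_pos hdp]
          have hsub : SubP (n - 1) := (ih (n - 1) (by omega)).2
          have h2max : (if 2 > maxDl then (2 : Int) else maxDl) = max maxDl 2 := by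
            rw [max_def]; split_ifs <;> omega
          rw [h2max]
          have := hsub t d (f + 1) f (i + 1) 2 maxDl (by omega) (by omega) (by omega)
            (by omega) hdp (by simp only [Nat.add_sub_cancel]; exact hd.symm) hmax (by omega)
          set p := aInner t d (f + 1) (i + 1) 2 with hp
          have hM : (if p.2 > maxDl then p.2 else maxDl) = max maxDl p.2 := by
            rw [max_def]; split_ifs <;> omega
          rw [hM]
          simpa using this.symm
        · rw [if_pos (by omega : d ≤ 0), if_neg hdp]
          rw [if_neg (by omega : ¬((1 : Int) > maxDl))]
          have hm : MainP (n - 1) := (ih (n - 1) (by omega)).1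
          have := hm t f (i + 1) maxDl 1 (by omega) (by omega) hmax
            (Or.inr ⟨by omega, by
              rintro ⟨hp, he⟩
              simp only [Nat.add_sub_cancel] at he
              omega⟩)
          simpa using this
      · have hz : t.length - (i + 1) = 0 := by omega
        rw [hz]
        cases fuel with
        | zero => rfl
        | succ f => rw [aLoop, if_neg hlt]; rfl
    refine ⟨hmain, ?_⟩
    intro t r fuelI fuelO koniec tempDl maxDl hn hfi hfo hk hr hrun hmax htd
    by_cases hc : koniec < t.length - 1 ∧ t.getD koniec 0 + r = t.getD (koniec + 1) 0
    · obtain ⟨fi, rfl⟩ : ∃ fi, fuelI = fi + 1 := ⟨fuelI - 1, by omega⟩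
      rw [aInner, if_pos hc]
      have hrange : t.length - (koniec + 1) = (t.length - (koniec + 2)) + 1 := by omega
      rw [hrange, List.range'_succ, List.foldl_cons]
      show (List.foldl (bStep t) (bStep t (max maxDl tempDl, tempDl) (koniec + 1)) _).1 = _
      rw [bStep]
      simp only [Nat.add_sub_cancel]
      have hidx : koniec + 1 - 2 = koniec - 1 := by omega
      rw [hidx]
      rw [if_pos (show t.getD (koniec + 1) 0 - t.getD koniec 0 > 0 ∧ 2 ≤ koniec + 1 ∧
            t.getD (koniec + 1) 0 - t.getD koniec 0 = t.getD koniec 0 - t.getD (koniec - 1) 0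
          from ⟨by omega, by omega, by omega⟩)]
      have hmaxstep :
          (if tempDl + 1 > max maxDl tempDl then tempDl + 1 else max maxDl tempDl)
            = max maxDl (tempDl + 1) := by
        rw [max_def, max_def]; split_ifs <;> omega
      rw [hmaxstep]
      have hsub : SubP (n - 1) := (ih (n - 1) (by omega)).2
      have := hsub t r fi fuelO (koniec + 1) (tempDl + 1) maxDl (by omega) (by omega)
        (by omega) (by omega) hr (by simp only [Nat.add_sub_cancel]; omega) hmax (by omega)
      simpa using this
    · have hstop : aInner t r fuelI koniec tempDl = (koniec, tempDl) := by
        cases fuelI with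
        | zero => rfl
        | succ f => rw [aInner, if_neg hc]
      rw [hstop]
      by_cases hend : koniec < t.length - 1
      · exact (hmain t fuelO koniec (max maxDl tempDl) tempDl (by omega) (by omega)
          (le_trans hmax (le_max_left _ _))
          (Or.inr ⟨hk, by rintro ⟨-, he⟩; rw [hrun] at he
                          exact hc ⟨hend, by omega⟩⟩)).symm
      · have hz : t.length - (koniec + 1) = 0 := by omega
        rw [hz]
        cases fuelO with
        | zero => rfl
        | succ f => rw [aLoop, if_neg hend]; rfl

-- ===== VERDICT (by name: the statement is the Claim_ definition above) =====
theorem najdlArytDodatni_spec : Claim_equal_najdlArytDodatni := by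
  intro t _
  unfold Spec_najdlArytDodatni najdlArytDodatni najdlArytDodatni_alt
  have := (combined (t.length + 1)).1 t t.length 0 1 1 (by omega) (by omega) (by omega)
    (Or.inl rfl)
  simpa using this
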